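-- pv_equiv track=rewrite | github.com/christosgalaios/NeuralStack-Content | agents/validation.py | _has_duplicated_paragraphs
-- ===== SOURCE A (Python) =====
-- def _has_duplicated_paragraphs(content: str) -> bool:
--     """Detect paragraphs repeated 2+ times (the padding bug)."""
--     paragraphs = [p.strip() for p in content.split("\n\n") if p.strip()]
--     seen = set()
--     for p in paragraphs:
--         # Normalise whitespace for comparison
--         normalised = " ".join(p.split())
--         if len(normalised) > 80 and normalised in seen:
--             return True
--         seen.add(normalised)
--     return False
-- ===== SOURCE B (Python) =====
-- def _has_duplicated_paragraphs(content: str) -> bool: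
--     """Detect paragraphs repeated 2+ times (the padding bug)."""
--     norms = (" ".join(p.split()) for p in content.split("\n\n"))
--     longs = sorted(n for n in norms if len(n) > 80)
--     return any(a == b for a, b in zip(longs, longs[1:]))
-- ===== Notes on version B (the rewrite author's own statement) =====
-- stated objective: alternative
-- what changed: B detects a repeat by sorting the long normalised paragraphs and scanning for an equal adjacent pair (zip with the tail), instead of A's single early-exit pass maintaining a running `seen` set that also stores short paragraphs which can never match.
import Mathlib
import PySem

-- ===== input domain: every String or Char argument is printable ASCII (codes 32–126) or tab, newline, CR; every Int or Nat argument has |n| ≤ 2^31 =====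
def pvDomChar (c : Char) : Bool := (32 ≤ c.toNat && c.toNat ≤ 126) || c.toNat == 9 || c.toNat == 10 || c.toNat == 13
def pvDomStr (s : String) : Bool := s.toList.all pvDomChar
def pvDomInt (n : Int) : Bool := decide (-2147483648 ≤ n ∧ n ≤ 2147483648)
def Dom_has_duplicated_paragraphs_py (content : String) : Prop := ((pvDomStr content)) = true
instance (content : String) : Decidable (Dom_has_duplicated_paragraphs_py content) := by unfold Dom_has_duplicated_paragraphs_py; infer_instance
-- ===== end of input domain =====

-- B sorts the long normalised paragraphs and scans for an equal adjacent pair,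
-- instead of A's early-exit pass with a running `seen` set.

-- ===== PORT A =====
-- the for-loop of A: early return on a long normalised paragraph already in `seen`
def pvALoop : List (List Char) → PySem.Set (List Char) → Bool
  | [], _ => false
  | p :: rest, seen =>
    let normalised := PySem.Chars.join [' '] (PySem.Chars.split₀ p)
    if 80 < normalised.length ∧ normalised ∈ seen then true
    else pvALoop rest (seen.add normalised)

def has_duplicated_paragraphs_py (content : String) : Bool :=
  let paragraphs := ((PySem.Chars.splitOn content.toList ['\n', '\n']).filter
      (fun p => !(PySem.Chars.strip p).isEmpty)).map PySem.Chars.strip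
  pvALoop paragraphs PySem.Set.empty

-- ===== PORT B =====
def has_duplicated_paragraphs_py_alt (content : String) : Bool :=
  let norms := (PySem.Chars.splitOn content.toList ['\n', '\n']).map
      (fun p => PySem.Chars.join [' '] (PySem.Chars.split₀ p))
  let longs := PySem.List.sorted (norms.filter (fun n => decide (80 < n.length))) (fun x => x) false
  -- longs[1:] on a list with a nonnegative index is exactly `drop 1`
  (longs.zip (longs.drop 1)).any (fun ab => ab.1 == ab.2)

-- ===== PRECONDITION & SPEC =====
def Spec_has_duplicated_paragraphs_py (content : String) (out : Bool) : Prop := out = has_duplicated_paragraphs_py_alt content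
instance (content : String) (out : Bool) : Decidable (Spec_has_duplicated_paragraphs_py content out) := by unfold Spec_has_duplicated_paragraphs_py; infer_instance

-- ===== CLAIM (what is proved, stated in full; the proofs are below) =====
def Claim_equal_has_duplicated_paragraphs_py : Prop := ∀ (content : String), Dom_has_duplicated_paragraphs_py content → Spec_has_duplicated_paragraphs_py content (has_duplicated_paragraphs_py content)

-- ===== LEMMAS AND PROOFS =====

-- the normalisation " ".join(p.split()) (proof-side name for the common subterm of both ports)
def pvNorm (p : List Char) : List Char := PySem.Chars.join [' '] (PySem.Chars.split₀ p)

-- split() treats a run of trailing whitespace characters as nothing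
theorem split₀_go_ws (ws : List Char) (hws : ws.all PySem.Chars.isspace = true) (cur : List Char)
    (acc : List (List Char)) :
    PySem.Chars.split₀.go ws cur acc = PySem.Chars.split₀.go [] cur acc := by
  induction ws generalizing cur acc with
  | nil => rfl
  | cons c rest ih =>
    simp only [List.all_cons, Bool.and_eq_true] at hws
    by_cases hc : cur.isEmpty <;>
      simp [PySem.Chars.split₀.go, hws.1, hc, ih hws.2, PySem.Chars.split₀.go]

theorem split₀_go_append_ws (ws : List Char) (hws : ws.all PySem.Chars.isspace = true)
    (s : List Char) (cur : List Char) (acc : List (List Char)) :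
      PySem.Chars.split₀.go (s ++ ws) cur acc = PySem.Chars.split₀.go s cur acc := by
  induction s generalizing cur acc with
  | nil => simpa using split₀_go_ws ws hws cur acc
  | cons c rest ih =>
    simp only [List.cons_append, PySem.Chars.split₀.go]
    by_cases h : PySem.Chars.isspace c <;> by_cases hc : cur.isEmpty <;> simp [h, hc, ih]

-- split() ignores leading whitespace
theorem split₀_go_dropWhile (s : List Char) (acc : List (List Char)) :
    PySem.Chars.split₀.go (s.dropWhile PySem.Chars.isspace) [] acc = PySem.Chars.split₀.go s [] acc := by
  induction s with
  | nil => simp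
  | cons c rest ih =>
    by_cases h : PySem.Chars.isspace c
    · simp [h, PySem.Chars.split₀.go, ih]
    · simp [h]

-- p.strip().split() = p.split()
theorem split₀_strip (p : List Char) :
    PySem.Chars.split₀ (PySem.Chars.strip p) = PySem.Chars.split₀ p := by
  have hq : ∀ q : List Char, PySem.Chars.split₀.go (PySem.Chars.rstrip q) [] [] =
      PySem.Chars.split₀.go q [] [] := by
    intro q
    have hdecomp : q = PySem.Chars.rstrip q ++ (q.reverse.takeWhile PySem.Chars.isspace).reverse := by
      simp only [PySem.Chars.rstrip]
      rw [← List.reverse_append, List.takeWhile_append_dropWhile, List.reverse_reverse]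
    have hws : ((q.reverse.takeWhile PySem.Chars.isspace).reverse).all PySem.Chars.isspace = true := by
      simp [List.all_reverse, List.all_takeWhile]
    conv_rhs => rw [hdecomp]
    rw [split₀_go_append_ws _ hws]
  show PySem.Chars.split₀.go _ [] [] = PySem.Chars.split₀.go _ [] []
  rw [PySem.Chars.strip, hq, PySem.Chars.lstrip, split₀_go_dropWhile]

-- a whitespace-only paragraph normalises to the empty string
theorem pvNorm_of_strip_empty (p : List Char) (h : (PySem.Chars.strip p).isEmpty = true) :
    pvNorm p = [] := by
  have hs : PySem.Chars.strip p = [] := by simpa using h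
  have h0 : PySem.Chars.split₀ p = [] := by rw [← split₀_strip, hs]; rfl
  simp [pvNorm, h0, PySem.Chars.join, List.intercalate]

-- characterisation of A's loop: it returns True iff some long normalised paragraph
-- is already in `seen` or occurs twice in the remaining list
theorem pvALoop_iff (ps : List (List Char)) (seen : PySem.Set (List Char)) :
    pvALoop ps seen = true ↔
      ∃ x : List Char, 80 < x.length ∧
        ((x ∈ seen ∧ x ∈ ps.map pvNorm) ∨ 2 ≤ (ps.map pvNorm).count x) := by
  induction ps generalizing seen with
  | nil => simp [pvALoop]
  | cons p rest ih =>
    show (if 80 < (pvNorm p).length ∧ pvNorm p ∈ seen then true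
        else pvALoop rest (seen.add (pvNorm p))) = true ↔ _
    by_cases hc : 80 < (pvNorm p).length ∧ pvNorm p ∈ seen
    · rw [if_pos hc]
      simp only [true_iff]
      exact ⟨pvNorm p, hc.1, Or.inl ⟨hc.2, by simp⟩⟩
    · rw [if_neg hc, ih]
      constructor
      · rintro ⟨x, hx, h | h⟩
        · rcases (PySem.Set.mem_add seen (pvNorm p) x).1 h.1 with hs | he
          · exact ⟨x, hx, Or.inl ⟨hs, by simp [h.2]⟩⟩
          · refine ⟨x, hx, Or.inr ?_⟩
            have h1 : 1 ≤ (rest.map pvNorm).count x := List.one_le_count_iff.2 h.2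
            simp only [List.map_cons, List.count_cons, ← he, beq_self_eq_true, if_true]
            omega
        · refine ⟨x, hx, Or.inr (le_trans h ?_)⟩
          rw [List.map_cons, List.count_cons]
          exact Nat.le_add_right _ _
      · rintro ⟨x, hx, ⟨hs, hm⟩ | h⟩
        · rcases List.mem_cons.1 hm with he | hm'
          · exact absurd ⟨he ▸ hx, he ▸ hs⟩ hc
          · exact ⟨x, hx, Or.inl ⟨(PySem.Set.mem_add seen (pvNorm p) x).2 (Or.inl hs), hm'⟩⟩
        · by_cases he : pvNorm p = x
          · have h2 : 1 ≤ (rest.map pvNorm).count x := by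
              simp only [List.map_cons, List.count_cons, he, beq_self_eq_true, if_true] at h
              omega
            exact ⟨x, hx, Or.inl ⟨(PySem.Set.mem_add seen (pvNorm p) x).2 (Or.inr he.symm),
              List.one_le_count_iff.1 h2⟩⟩
          · refine ⟨x, hx, Or.inr ?_⟩
            simpa [List.count_cons, he] using h

-- in a ≤-sorted list, some adjacent pair is equal iff the list has a duplicate
theorem anyAdj_eq_not_nodup (l : List (List Char)) (hp : l.Pairwise (· ≤ ·)) :
    ((l.zip (l.drop 1)).any (fun ab => ab.1 == ab.2) = true) ↔ ¬ l.Nodup := by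
  induction l with
  | nil => simp
  | cons a rest ih =>
    cases rest with
    | nil => simp
    | cons b t =>
      have hab : a ≤ b := (List.pairwise_cons.1 hp).1 b (by simp)
      have hrest : (b :: t).Pairwise (· ≤ ·) := (List.pairwise_cons.1 hp).2
      have hzip : ((a :: b :: t).zip ((a :: b :: t).drop 1)) =
          (a, b) :: ((b :: t).zip ((b :: t).drop 1)) := by simp [List.zip]
      rw [hzip]
      simp only [List.any_cons, Bool.or_eq_true, ih hrest]
      by_cases he : a = b
      · subst he
        simp [List.nodup_cons]
      · have hlt : a < b := lt_of_le_of_ne hab he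
        have hnot : a ∉ b :: t := by
          intro hmem
          rcases List.mem_cons.1 hmem with h | h
          · exact he h
          · have hbt : b ≤ a := List.rel_of_pairwise_cons hrest h
            exact absurd (lt_of_lt_of_le hlt hbt) (lt_irrefl a)
        simp [he, List.nodup_cons, hnot]

-- B's test: the filtered list of long norms has a duplicate iff some long norm occurs twice
theorem dup_long_iff (ns : List (List Char)) :
    (¬ (ns.filter (fun n => decide (80 < n.length))).Nodup) ↔
      ∃ x : List Char, 80 < x.length ∧ 2 ≤ ns.count x := by
  rw [List.nodup_iff_count_le_one]
  constructor
  · intro h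
    rcases not_forall.1 h with ⟨x, hx⟩
    have h2 : 2 ≤ (ns.filter (fun n => decide (80 < n.length))).count x := by omega
    have hmem : x ∈ ns.filter (fun n => decide (80 < n.length)) :=
      List.one_le_count_iff.1 (by omega)
    have hlong : 80 < x.length := by simpa using (List.mem_filter.1 hmem).2
    refine ⟨x, hlong, le_trans h2 ?_⟩
    exact List.Sublist.count_le x List.filter_sublist
  · rintro ⟨x, hlong, h2⟩ hall
    have := hall x
    rw [List.count_filter (by simpa using hlong)] at this
    omega

-- dropping whitespace-only paragraphs and stripping does not change counts of nonempty norms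
theorem count_norm_filter (l : List (List Char)) (x : List Char) (hx : x ≠ []) :
    (((l.filter (fun p => !(PySem.Chars.strip p).isEmpty)).map PySem.Chars.strip).map pvNorm).count x
      = (l.map pvNorm).count x := by
  simp only [List.map_map]
  induction l with
  | nil => rfl
  | cons p rest ih =>
    by_cases h : (PySem.Chars.strip p).isEmpty
    · have hne : pvNorm p ≠ x := by rw [pvNorm_of_strip_empty p h]; exact fun e => hx e.symm
      rw [List.filter_cons_of_neg (by simp [h]), List.map_cons, List.count_cons, ih]
      simp [hne]
    · have hstrip : (pvNorm ∘ PySem.Chars.strip) p = pvNorm p := by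
        show pvNorm (PySem.Chars.strip p) = pvNorm p
        simp [pvNorm, split₀_strip]
      rw [List.filter_cons_of_pos (by simp [h]), List.map_cons, List.map_cons,
        List.count_cons, List.count_cons, ih, hstrip]

-- B's test on any list of norms: some adjacent pair of the sorted long norms is equal
-- iff some long norm occurs twice
theorem pvBtest_iff (ns : List (List Char)) :
    (((PySem.List.sorted (ns.filter (fun n => decide (80 < n.length))) (fun x => x) false).zip
      ((PySem.List.sorted (ns.filter (fun n => decide (80 < n.length))) (fun x => x) false).drop 1)).any
      (fun ab => ab.1 == ab.2) = true) ↔ ∃ x : List Char, 80 < x.length ∧ 2 ≤ ns.count x := by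
  have hpw := PySem.List.sorted_pairwise (ns.filter (fun n => decide (80 < n.length))) (fun x => x)
  have hperm := PySem.List.sorted_perm (ns.filter (fun n => decide (80 < n.length))) (fun x => x) false
  have hinst : (fun (a b : List Char) => a.decidableLT b)
      = (LinearOrder.toDecidableLT : DecidableLT (List Char)) :=
    funext fun a => funext fun b => Subsingleton.elim _ _
  rw [hinst] at hperm ⊢
  exact Iff.trans (anyAdj_eq_not_nodup _ (by simpa using hpw))
    ((not_congr hperm.nodup_iff).trans (dup_long_iff ns))

-- ===== VERDICT (by name: the statement is the Claim_ definition above) =====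
theorem has_duplicated_paragraphs_py_spec : Claim_equal_has_duplicated_paragraphs_py := by
  intro content _
  show has_duplicated_paragraphs_py content = has_duplicated_paragraphs_py_alt content
  unfold has_duplicated_paragraphs_py has_duplicated_paragraphs_py_alt
  rw [show (fun p => PySem.Chars.join [' '] (PySem.Chars.split₀ p)) = pvNorm from rfl]
  rw [Bool.eq_iff_iff, pvALoop_iff, pvBtest_iff]
  constructor
  · rintro ⟨x, hx, h | h⟩
    · exact absurd h.1 (by simp [PySem.Set.empty])
    · refine ⟨x, hx, ?_⟩
      rw [← count_norm_filter _ x (by intro e; rw [e] at hx; simp at hx)]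
      exact h
  · rintro ⟨x, hx, h⟩
    refine ⟨x, hx, Or.inr ?_⟩
    rw [count_norm_filter _ x (by intro e; rw [e] at hx; simp at hx)]
    exact h
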